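-- pv_equiv track=rewrite | github.com/chaoyij/HuffmanEmbed | huffman_coding.py | n_ary_huffman_coding
-- ===== SOURCE A (Python) =====
-- import heapq
-- from typing import Dict, Optional
--
-- class Node:
--     def __init__(self, freq: int, symbol: int, left=None, right=None, children=None):
--         self.freq = freq
--         self.symbol = symbol
--         self.left = left
--         self.right = right
--         self.children = children if children is not None else []
--         self.huff = ''
--
--     def __lt__(self, nxt):
--         return self.freq < nxt.freq
--
-- def print_n_ary_nodes(node: Node, val: int, huffman_coding_dict: Dict[str, int]) -> int:
--     newVal = val + "," + str(node.huff) if val != '' else str(node.huff)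
--
--     max_len = 0
--
--     for child in node.children:
--         if child:
--             child_len = print_n_ary_nodes(child, newVal, huffman_coding_dict)
--             if child_len > max_len:
--                 max_len = child_len
--
--     if len(node.children) == 0 and node.symbol != -1:
--         huffman_coding_dict[node.symbol] = newVal
--         coding_length = newVal.count(",") + 1
--         if coding_length > max_len:
--             max_len = coding_length
--
--     return max_len
--
-- def n_ary_huffman_coding(freq_dict: Dict[str, int], n: int):
--     nodes = []
--     remain = (len(freq_dict) - 1) % (n - 1)
--     if remain != 0:
--         for _ in range(n - 1 - remain):
--             heapq.heappush(nodes, Node(0, -1))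
--
--     for key, value in freq_dict.items():
--         heapq.heappush(nodes, Node(value, key))
--
--     while len(nodes) > 1:
--
--         candidate_nodes = []
--         for i in range(n):
--             candidate_node = heapq.heappop(nodes)
--             candidate_nodes.append(candidate_node)
--             candidate_nodes[-1].huff = i
--
--         newNode = Node(sum(candidate_node.freq for candidate_node in candidate_nodes), -1, None, None, candidate_nodes)
--
--         heapq.heappush(nodes, newNode)
--
--     huffman_coding_dict = dict()
--
--     max_len = print_n_ary_nodes(nodes[0], '', huffman_coding_dict)
--
--     return huffman_coding_dict, max_len
-- ===== SOURCE B (Python) =====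
-- import heapq
--
-- class _Group:
--     """A pending subtree: total frequency + (symbol, code-part list) for each real leaf."""
--     __slots__ = ("freq", "codes")
--
--     def __init__(self, freq, codes):
--         self.freq = freq
--         self.codes = codes
--
--     def __lt__(self, other):
--         return self.freq < other.freq
--
-- def n_ary_huffman_coding(freq_dict, n):
--     groups = []
--     remain = (len(freq_dict) - 1) % (n - 1)
--     if remain != 0:
--         for _ in range(n - 1 - remain):
--             heapq.heappush(groups, _Group(0, []))
--
--     for key, value in freq_dict.items():
--         heapq.heappush(groups, _Group(value, [(key, [])]))
--
--     while len(groups) > 1: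
--         total = 0
--         merged = []
--         for i in range(n):
--             g = heapq.heappop(groups)
--             total += g.freq
--             digit = str(i)
--             merged.extend((sym, [digit] + parts) for sym, parts in g.codes)
--         heapq.heappush(groups, _Group(total, merged))
--
--     root = groups[0]
--     huffman_coding_dict = {}
--     max_len = 0
--     for sym, parts in root.codes:
--         huffman_coding_dict[sym] = ",".join(parts)
--         max_len = max(max_len, max(len(parts), 1))
--
--     return huffman_coding_dict, max_len
-- ===== Notes on version B (the rewrite author's own statement) =====
-- stated objective: alternative
-- what changed: B never builds a Node tree: heap items are (freq, codes) groups that carry each symbol's code-part list, merging prepends the child digit to every code in the popped group, so the recursive print_n_ary_nodes traversal and the Node class disappear and the final dict/max-length are read off the root group in one pass.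
import Mathlib
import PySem

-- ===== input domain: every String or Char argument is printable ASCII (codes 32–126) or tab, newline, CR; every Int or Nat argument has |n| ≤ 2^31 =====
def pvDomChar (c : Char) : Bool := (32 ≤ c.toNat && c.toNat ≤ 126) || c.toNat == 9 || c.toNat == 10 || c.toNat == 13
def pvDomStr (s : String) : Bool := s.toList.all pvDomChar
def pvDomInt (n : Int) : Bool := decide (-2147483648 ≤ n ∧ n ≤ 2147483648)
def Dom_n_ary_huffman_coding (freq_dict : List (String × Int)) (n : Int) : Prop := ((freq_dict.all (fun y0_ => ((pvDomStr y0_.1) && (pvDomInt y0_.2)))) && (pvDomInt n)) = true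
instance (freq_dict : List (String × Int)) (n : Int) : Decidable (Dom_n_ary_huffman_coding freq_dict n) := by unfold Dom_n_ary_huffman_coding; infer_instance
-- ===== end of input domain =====

-- B replaces the Node tree + recursive print traversal of A by heap items that carry
-- the (symbol, code parts) lists directly; same heapq mechanics, no tree, no recursion.

-- ===== PORT A =====
-- Shared helper: a literal port of CPython's heapq (heappush / heappop with their
-- _siftdown / _siftup loops), generic in the element type and the `<` of the elements,
-- used by both ports exactly as both Pythons call the heapq library. The heap lives in
-- an Array, like CPython's list (List-level models and proofs are below the claim).
-- `_siftdown`'s while-loop; the out-of-range default of getD is never hit on real calls.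
def pvSiftdownLoop {α : Type} (lt : α → α → Bool) (newitem : α) (heap : Array α)
    (startpos pos : Nat) : Array α :=
  if _h : startpos < pos then
    let parentpos := (pos - 1) / 2
    let parent := heap.getD parentpos newitem
    if lt newitem parent then
      pvSiftdownLoop lt newitem (heap.setIfInBounds pos parent) startpos parentpos
    else heap.setIfInBounds pos newitem
  else heap.setIfInBounds pos newitem
termination_by pos
decreasing_by have := Nat.div_le_self (pos - 1) 2; omega

def pvHeappush {α : Type} (lt : α → α → Bool) (heap : Array α) (item : α) : Array α :=
  pvSiftdownLoop lt item (heap.push item) 0 heap.size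

-- `_siftup`'s child-descending while-loop; returns the array and the final position.
def pvSiftupLoop {α : Type} (lt : α → α → Bool) (junk : α) (heap : Array α)
    (pos endpos : Nat) : Array α × Nat :=
  if _h : 2 * pos + 1 < endpos then
    let c := if (2 * pos + 2 < endpos) &&
                !(lt (heap.getD (2 * pos + 1) junk) (heap.getD (2 * pos + 2) junk))
             then 2 * pos + 2 else 2 * pos + 1
    pvSiftupLoop lt junk (heap.setIfInBounds pos (heap.getD c junk)) c endpos
  else (heap, pos)
termination_by endpos - pos
decreasing_by split <;> omega

-- `_siftup(heap, 0)` followed by its trailing `_siftdown` call.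
def pvSiftup0 {α : Type} (lt : α → α → Bool) (heap : Array α) : Array α :=
  match heap[0]? with
  | none => heap
  | some x =>
    let r := pvSiftupLoop lt x heap 0 heap.size
    pvSiftdownLoop lt x (r.1.setIfInBounds r.2 x) 0 r.2

-- heappop: none exactly where Python raises IndexError (empty heap).
def pvHeappop {α : Type} (lt : α → α → Bool) (heap : Array α) : Option (α × Array α) :=
  match heap.back? with
  | none => none
  | some last =>
    let rest := heap.pop
    match rest[0]? with
    | none => some (last, rest)
    | some ret => some (ret, pvSiftup0 lt (rest.setIfInBounds 0 last))

-- A's Node: freq, symbol (none = -1), huff (A stores int i, read only as str(i): kept as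
-- its string form, "" initially), children (mutual list to avoid a nested inductive).
mutual
inductive PNode : Type where
  | mk : Int → Option String → String → PNodeList → PNode
inductive PNodeList : Type where
  | nil : PNodeList
  | cons : PNode → PNodeList → PNodeList
end

def PNode.freq : PNode → Int | .mk f _ _ _ => f
def PNode.setHuff : PNode → String → PNode | .mk f s _ c, h => .mk f s h c

-- children list → PNodeList, tail-recursively (stack-safe; equals the structural
-- PNodeList.ofList of the proof layer, see pvOfListTR_eq below the claim).
def PNodeList.ofListTR (l : List PNode) : PNodeList :=
  l.reverse.foldl (fun acc x => PNodeList.cons x acc) PNodeList.nil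

-- Node.__lt__: compares freq only.
def pvLtNode (a b : PNode) : Bool := a.freq < b.freq

-- A's inner `for i in range(n)` pop loop: pop, append, set huff of the popped node to i.
-- The `none` branch is Python's IndexError, excluded by Pre_.
def pvPopCandidatesA (i cnt : Nat) (heap : Array PNode) (acc : Array PNode) :
    Array PNode × Array PNode :=
  match cnt with
  | 0 => (acc, heap)
  | cnt + 1 =>
    match pvHeappop pvLtNode heap with
    | none => (acc, heap)
    | some r =>
      pvPopCandidatesA (i + 1) cnt r.2 (acc.push (r.1.setHuff (PySem.Int.toStr (i : Int))))

-- A's `while len(nodes) > 1` merge loop; fuel = initial heap size (enough under Pre_).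
def pvMergeLoopA (fuel : Nat) (n : Int) (heap : Array PNode) : Array PNode :=
  match fuel with
  | 0 => heap
  | fuel + 1 =>
    if heap.size > 1 then
      let r := pvPopCandidatesA 0 n.toNat heap #[]
      let newNode : PNode :=
        .mk (r.1.foldl (fun s nd => s + nd.freq) 0) none "" (PNodeList.ofListTR r.1.toList)
      pvMergeLoopA fuel n (pvHeappush pvLtNode r.2 newNode)
    else heap

-- print_n_ary_nodes: recursion over the tree, threading the dict, returning max_len.
mutual
def pvPrintNodes (nd : PNode) (val : String) (d : PySem.Dict String String) :
    PySem.Dict String String × Int :=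
  match nd with
  | .mk _ sym huff children =>
    let newVal := if val ≠ "" then val ++ "," ++ huff else huff
    let r := pvPrintChildren children newVal d 0
    match children, sym with
    | .nil, some s =>
      let codingLength : Int := (PySem.Str.count newVal "," : Int) + 1
      (r.1.insert s newVal, if codingLength > r.2 then codingLength else r.2)
    | _, _ => r
def pvPrintChildren (cs : PNodeList) (newVal : String) (d : PySem.Dict String String)
    (maxLen : Int) : PySem.Dict String String × Int :=
  match cs with
  | .nil => (d, maxLen)
  | .cons c rest =>
    let r := pvPrintNodes c newVal d
    pvPrintChildren rest newVal r.1 (if r.2 > maxLen then r.2 else maxLen)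
end

def n_ary_huffman_coding (freq_dict : List (String × Int)) (n : Int) :
    (List (String × String)) × Int :=
  let items := (PySem.Dict.ofList freq_dict).items
  -- (len(freq_dict) - 1) % (n - 1): n = 1 (division by zero) is excluded by Pre_
  let remain := PySem.Int.mod ((items.length : Int) - 1) (n - 1)
  let nodes0 : Array PNode := #[]
  let nodes1 :=
    if remain ≠ 0 then
      (List.range (n - 1 - remain).toNat).foldl
        (fun h _ => pvHeappush pvLtNode h (.mk 0 none "" .nil)) nodes0
    else nodes0
  let nodes2 := items.foldl
    (fun h kv => pvHeappush pvLtNode h (.mk kv.2 (some kv.1) "" .nil)) nodes1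
  let nodes3 := pvMergeLoopA nodes2.size n nodes2
  match nodes3[0]? with
  | none => ([], 0)   -- Python: IndexError on nodes[0]; excluded by Pre_
  | some root =>
    let r := pvPrintNodes root "" PySem.Dict.empty
    (r.1.items, r.2)

-- ===== PORT B =====
-- B's heap items: _Group(freq, codes) = (freq, list of (symbol, code-part list)).
def pvLtGroup (a b : Int × List (String × List String)) : Bool := a.1 < b.1

-- B's inner pop loop: accumulate total freq and the digit-prepended codes.
def pvPopMergeB (i cnt : Nat) (heap : Array (Int × List (String × List String)))
    (total : Int) (merged : List (String × List String)) :
    (Int × List (String × List String)) × Array (Int × List (String × List String)) :=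
  match cnt with
  | 0 => ((total, merged), heap)
  | cnt + 1 =>
    match pvHeappop pvLtGroup heap with
    | none => ((total, merged), heap)
    | some g =>
      pvPopMergeB (i + 1) cnt g.2 (total + g.1.1)
        (merged ++ g.1.2.map (fun sc => (sc.1, PySem.Int.toStr (i : Int) :: sc.2)))

def pvMergeLoopB (fuel : Nat) (n : Int)
    (heap : Array (Int × List (String × List String))) :
    Array (Int × List (String × List String)) :=
  match fuel with
  | 0 => heap
  | fuel + 1 =>
    if heap.size > 1 then
      let r := pvPopMergeB 0 n.toNat heap 0 []
      pvMergeLoopB fuel n (pvHeappush pvLtGroup r.2 r.1)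
    else heap

def n_ary_huffman_coding_alt (freq_dict : List (String × Int)) (n : Int) :
    (List (String × String)) × Int :=
  let items := (PySem.Dict.ofList freq_dict).items
  let remain := PySem.Int.mod ((items.length : Int) - 1) (n - 1)
  let groups0 : Array (Int × List (String × List String)) := #[]
  let groups1 :=
    if remain ≠ 0 then
      (List.range (n - 1 - remain).toNat).foldl
        (fun h _ => pvHeappush pvLtGroup h (0, [])) groups0
    else groups0
  let groups2 := items.foldl
    (fun h kv => pvHeappush pvLtGroup h (kv.2, [(kv.1, [])])) groups1
  let groups3 := pvMergeLoopB groups2.size n groups2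
  match groups3[0]? with
  | none => ([], 0)   -- Python: IndexError on groups[0]; excluded by Pre_
  | some g =>
    let r := g.2.foldl
      (fun acc sc =>
        (acc.1.insert sc.1 (PySem.Str.join "," sc.2),
         max acc.2 (max (sc.2.length : Int) 1)))
      (PySem.Dict.empty, 0)
    (r.1.items, r.2)

-- ===== PRECONDITION & SPEC =====
-- Pre_ excludes exactly the inputs where A does not return: n = 1 (ZeroDivisionError),
-- n = 2 with an empty dict and n ≤ 0 with an empty dict (IndexError on nodes[0]), and
-- n ≤ 0 with ≥ 2 distinct keys (the merge loop never shrinks the heap: no termination).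
def Pre_n_ary_huffman_coding (freq_dict : List (String × Int)) (n : Int) : Prop :=
  (2 ≤ n ∧ (n = 2 → freq_dict ≠ [])) ∨
  (n ≤ 0 ∧ (PySem.List.dedup (freq_dict.map Prod.fst)).length = 1)
instance (freq_dict : List (String × Int)) (n : Int) :
    Decidable (Pre_n_ary_huffman_coding freq_dict n) := by
  unfold Pre_n_ary_huffman_coding; infer_instance

def pvWitness_n_ary_huffman_coding : (List (String × Int)) × Int :=
  ([("a", 5), ("b", 2), ("c", 1)], 3)

def Spec_n_ary_huffman_coding (freq_dict : List (String × Int)) (n : Int)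
    (out : (List (String × String)) × Int) : Prop :=
  out = n_ary_huffman_coding_alt freq_dict n
instance (freq_dict : List (String × Int)) (n : Int)
    (out : (List (String × String)) × Int) :
    Decidable (Spec_n_ary_huffman_coding freq_dict n out) := by
  unfold Spec_n_ary_huffman_coding; infer_instance

-- ===== CLAIM (what is proved, stated in full; the proofs are below) =====
def Claim_equal_n_ary_huffman_coding : Prop :=
  ∀ (freq_dict : List (String × Int)) (n : Int),
    Dom_n_ary_huffman_coding freq_dict n → Pre_n_ary_huffman_coding freq_dict n →
    Spec_n_ary_huffman_coding freq_dict n (n_ary_huffman_coding freq_dict n)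

-- ===== LEMMAS AND PROOFS =====

-- ── List-level models of the Array heap code (proof layer; bridged by toList) ──
def PNode.huff : PNode → String | .mk _ _ h _ => h

def PNodeList.ofList : List PNode → PNodeList
  | [] => .nil
  | x :: xs => .cons x (PNodeList.ofList xs)

theorem pvOfListTR_eq (l : List PNode) : PNodeList.ofListTR l = PNodeList.ofList l := by
  induction l with
  | nil => rfl
  | cons x xs ih =>
    unfold PNodeList.ofListTR at *
    rw [List.reverse_cons, List.foldl_append, ih]
    rfl

def pvSiftdownLoopM {α : Type} (lt : α → α → Bool) (newitem : α) (heap : List α)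
    (startpos pos : Nat) : List α :=
  if _h : startpos < pos then
    let parentpos := (pos - 1) / 2
    let parent := heap.getD parentpos newitem
    if lt newitem parent then
      pvSiftdownLoopM lt newitem (heap.set pos parent) startpos parentpos
    else heap.set pos newitem
  else heap.set pos newitem
termination_by pos
decreasing_by have := Nat.div_le_self (pos - 1) 2; omega

def pvHeappushM {α : Type} (lt : α → α → Bool) (heap : List α) (item : α) : List α :=
  pvSiftdownLoopM lt item (heap ++ [item]) 0 heap.length

def pvSiftupLoopM {α : Type} (lt : α → α → Bool) (junk : α) (heap : List α)
    (pos endpos : Nat) : List α × Nat :=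
  if _h : 2 * pos + 1 < endpos then
    let c := if (2 * pos + 2 < endpos) &&
                !(lt (heap.getD (2 * pos + 1) junk) (heap.getD (2 * pos + 2) junk))
             then 2 * pos + 2 else 2 * pos + 1
    pvSiftupLoopM lt junk (heap.set pos (heap.getD c junk)) c endpos
  else (heap, pos)
termination_by endpos - pos
decreasing_by split <;> omega

def pvSiftup0M {α : Type} (lt : α → α → Bool) (heap : List α) : List α :=
  match heap with
  | [] => []
  | x :: xs =>
    let r := pvSiftupLoopM lt x (x :: xs) 0 (x :: xs).length
    pvSiftdownLoopM lt x (r.1.set r.2 x) 0 r.2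

def pvHeappopM {α : Type} (lt : α → α → Bool) (heap : List α) : Option (α × List α) :=
  match heap with
  | [] => none
  | x :: xs =>
    let last := ((x :: xs).getLast?).getD x
    match (x :: xs).dropLast with
    | [] => some (last, [])
    | y :: ys => some (y, pvSiftup0M lt ((y :: ys).set 0 last))

def pvPopCandidatesAM (i cnt : Nat) (heap : List PNode) (acc : List PNode) :
    List PNode × List PNode :=
  match cnt with
  | 0 => (acc, heap)
  | cnt + 1 =>
    match pvHeappopM pvLtNode heap with
    | none => (acc, heap)
    | some r =>
      pvPopCandidatesAM (i + 1) cnt r.2 (acc ++ [r.1.setHuff (PySem.Int.toStr (i : Int))])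

def pvMergeLoopAM (fuel : Nat) (n : Int) (heap : List PNode) : List PNode :=
  match fuel with
  | 0 => heap
  | fuel + 1 =>
    if heap.length > 1 then
      let r := pvPopCandidatesAM 0 n.toNat heap []
      let newNode : PNode :=
        .mk (r.1.foldl (fun s nd => s + nd.freq) 0) none "" (PNodeList.ofList r.1)
      pvMergeLoopAM fuel n (pvHeappushM pvLtNode r.2 newNode)
    else heap

def pvPopMergeBM (i cnt : Nat) (heap : List (Int × List (String × List String)))
    (total : Int) (merged : List (String × List String)) :
    (Int × List (String × List String)) × List (Int × List (String × List String)) :=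
  match cnt with
  | 0 => ((total, merged), heap)
  | cnt + 1 =>
    match pvHeappopM pvLtGroup heap with
    | none => ((total, merged), heap)
    | some g =>
      pvPopMergeBM (i + 1) cnt g.2 (total + g.1.1)
        (merged ++ g.1.2.map (fun sc => (sc.1, PySem.Int.toStr (i : Int) :: sc.2)))

def pvMergeLoopBM (fuel : Nat) (n : Int)
    (heap : List (Int × List (String × List String))) :
    List (Int × List (String × List String)) :=
  match fuel with
  | 0 => heap
  | fuel + 1 =>
    if heap.length > 1 then
      let r := pvPopMergeBM 0 n.toNat heap 0 []
      pvMergeLoopBM fuel n (pvHeappushM pvLtGroup r.2 r.1)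
    else heap

-- ── bridges: each Array-level port helper computes its List-level model ──
theorem pvGetD_arr {α : Type} (a : Array α) (i : Nat) (d : α) :
    a.getD i d = a.toList.getD i d := by
  simp only [Array.getD, List.getD_eq_getElem?_getD]
  split <;> simp_all

theorem pvSiftdownLoop_toList {α : Type} (lt : α → α → Bool) (it : α) (heap : Array α)
    (s p : Nat) :
    (pvSiftdownLoop lt it heap s p).toList = pvSiftdownLoopM lt it heap.toList s p := by
  fun_induction pvSiftdownLoop lt it heap s p with
  | case1 heap p hp pp par hcond ih =>
    simp only [pp, par] at hcond ih
    rw [pvSiftdownLoopM]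
    simp only [dif_pos hp]
    rw [← pvGetD_arr, hcond, if_pos rfl]
    rw [Array.toList_setIfInBounds] at ih
    exact ih
  | case2 heap p hp pp par hcond =>
    simp only [pp, par] at hcond
    rw [pvSiftdownLoopM]
    simp only [dif_pos hp]
    rw [← pvGetD_arr]
    simp only [hcond, Bool.false_eq_true, if_false]
    rw [Array.toList_setIfInBounds]
  | case3 heap p hp =>
    rw [pvSiftdownLoopM]
    simp only [dif_neg hp]
    rw [Array.toList_setIfInBounds]

theorem pvHeappush_toList {α : Type} (lt : α → α → Bool) (heap : Array α) (item : α) :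
    (pvHeappush lt heap item).toList = pvHeappushM lt heap.toList item := by
  unfold pvHeappush pvHeappushM
  rw [pvSiftdownLoop_toList, Array.toList_push, Array.length_toList]

theorem pvSiftupLoop_toList {α : Type} (lt : α → α → Bool) (junk : α) (heap : Array α)
    (p e : Nat) :
    ((pvSiftupLoop lt junk heap p e).1.toList, (pvSiftupLoop lt junk heap p e).2)
      = pvSiftupLoopM lt junk heap.toList p e := by
  fun_induction pvSiftupLoop lt junk heap p e with
  | case1 heap p hp c ih =>
    simp only [c] at ih
    rw [pvSiftupLoopM]
    simp only [dif_pos hp]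
    rw [← pvGetD_arr, ← pvGetD_arr, ← pvGetD_arr]
    rw [Array.toList_setIfInBounds] at ih
    exact ih
  | case2 heap p hp =>
    rw [pvSiftupLoopM]
    simp only [dif_neg hp]

theorem pvSiftup0_toList {α : Type} (lt : α → α → Bool) (heap : Array α) :
    (pvSiftup0 lt heap).toList = pvSiftup0M lt heap.toList := by
  cases hl : heap.toList with
  | nil =>
    have h0 : heap[0]? = none := by
      rw [← Array.getElem?_toList, hl]; rfl
    unfold pvSiftup0 pvSiftup0M
    rw [h0]
    try rw [hl]
    try exact hl
  | cons x xs =>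
    have h0 : heap[0]? = some x := by
      rw [← Array.getElem?_toList, hl]; rfl
    have hsz : heap.size = (x :: xs).length := by rw [← Array.length_toList, hl]
    unfold pvSiftup0 pvSiftup0M
    rw [h0]
    show (pvSiftdownLoop lt x
        ((pvSiftupLoop lt x heap 0 heap.size).1.setIfInBounds
          (pvSiftupLoop lt x heap 0 heap.size).2 x) 0
        (pvSiftupLoop lt x heap 0 heap.size).2).toList
      = pvSiftdownLoopM lt x
        ((pvSiftupLoopM lt x (x :: xs) 0 (x :: xs).length).1.set
          (pvSiftupLoopM lt x (x :: xs) 0 (x :: xs).length).2 x) 0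
        (pvSiftupLoopM lt x (x :: xs) 0 (x :: xs).length).2
    have hloop := pvSiftupLoop_toList lt x heap 0 heap.size
    rw [hl, hsz] at hloop
    have h1 := congrArg Prod.fst hloop
    have h2 := congrArg Prod.snd hloop
    simp only at h1 h2
    rw [pvSiftdownLoop_toList, Array.toList_setIfInBounds, hsz, h1, h2]

theorem pvHeappop_toList {α : Type} (lt : α → α → Bool) (heap : Array α) :
    (pvHeappop lt heap).map (fun r => (r.1, r.2.toList)) = pvHeappopM lt heap.toList := by
  cases hl : heap.toList with
  | nil =>
    have hb : heap.back? = none := by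
      rw [← Array.getLast?_toList, hl]; rfl
    unfold pvHeappop pvHeappopM
    rw [hb]
    try rw [hl]
    rfl
  | cons x xs =>
    have hb : heap.back? = some (((x :: xs).getLast?).getD x) := by
      rw [← Array.getLast?_toList, hl]
      cases hgl : (x :: xs).getLast? with
      | none => simp at hgl
      | some v => rfl
    have hrest : heap.pop.toList = (x :: xs).dropLast := by
      rw [Array.toList_pop, hl]
    unfold pvHeappop pvHeappopM
    rw [hb]
    try rw [hl]
    cases hdl : (x :: xs).dropLast with
    | nil =>
      have h0 : heap.pop[0]? = none := by
        rw [← Array.getElem?_toList, hrest, hdl]; rfl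
      show (Option.map (fun r => (r.1, r.2.toList))
        (match heap.pop[0]? with
          | none => some (((x :: xs).getLast?).getD x, heap.pop)
          | some ret => some (ret, pvSiftup0 lt
              (heap.pop.setIfInBounds 0 (((x :: xs).getLast?).getD x))))) = _
      rw [h0]
      simp only [Option.map_some]
      rw [hrest, hdl]
    | cons y ys =>
      have h0 : heap.pop[0]? = some y := by
        rw [← Array.getElem?_toList, hrest, hdl]; rfl
      show (Option.map (fun r => (r.1, r.2.toList))
        (match heap.pop[0]? with
          | none => some (((x :: xs).getLast?).getD x, heap.pop)
          | some ret => some (ret, pvSiftup0 lt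
              (heap.pop.setIfInBounds 0 (((x :: xs).getLast?).getD x))))) = _
      rw [h0]
      simp only [Option.map_some]
      rw [pvSiftup0_toList, Array.toList_setIfInBounds, hrest, hdl]

theorem pvPopCandidatesA_toList (i cnt : Nat) (heap : Array PNode) (acc : Array PNode) :
    ((pvPopCandidatesA i cnt heap acc).1.toList, (pvPopCandidatesA i cnt heap acc).2.toList)
      = pvPopCandidatesAM i cnt heap.toList acc.toList := by
  induction cnt generalizing i heap acc with
  | zero => rfl
  | succ cnt ih =>
    rw [pvPopCandidatesA, pvPopCandidatesAM, ← pvHeappop_toList]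
    cases hp : pvHeappop pvLtNode heap with
    | none => rfl
    | some r =>
      simp only [Option.map_some]
      rw [← Array.toList_push, ih]

theorem pvMergeLoopA_toList (fuel : Nat) (n : Int) (heap : Array PNode) :
    (pvMergeLoopA fuel n heap).toList = pvMergeLoopAM fuel n heap.toList := by
  induction fuel generalizing heap with
  | zero => rfl
  | succ fuel ih =>
    rw [pvMergeLoopA, pvMergeLoopAM, ← Array.length_toList]
    split
    · rw [ih, pvHeappush_toList]
      have hpc := pvPopCandidatesA_toList 0 n.toNat heap #[]
      have h1 : (pvPopCandidatesA 0 n.toNat heap #[]).1.toList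
          = (pvPopCandidatesAM 0 n.toNat heap.toList []).1 := by
        rw [← hpc]
      have h2 : (pvPopCandidatesA 0 n.toNat heap #[]).2.toList
          = (pvPopCandidatesAM 0 n.toNat heap.toList []).2 := by
        rw [← hpc]
      rw [← Array.foldl_toList, pvOfListTR_eq, h1, h2]
    · rfl

theorem pvPopMergeB_toList (i cnt : Nat) (heap : Array (Int × List (String × List String)))
    (t : Int) (m : List (String × List String)) :
    ((pvPopMergeB i cnt heap t m).1, (pvPopMergeB i cnt heap t m).2.toList)
      = pvPopMergeBM i cnt heap.toList t m := by
  induction cnt generalizing i heap t m with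
  | zero => rfl
  | succ cnt ih =>
    rw [pvPopMergeB, pvPopMergeBM, ← pvHeappop_toList]
    cases hp : pvHeappop pvLtGroup heap with
    | none => rfl
    | some g =>
      simp only [Option.map_some]
      rw [ih]

theorem pvMergeLoopB_toList (fuel : Nat) (n : Int)
    (heap : Array (Int × List (String × List String))) :
    (pvMergeLoopB fuel n heap).toList = pvMergeLoopBM fuel n heap.toList := by
  induction fuel generalizing heap with
  | zero => rfl
  | succ fuel ih =>
    rw [pvMergeLoopB, pvMergeLoopBM, ← Array.length_toList]
    split
    · rw [ih, pvHeappush_toList]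
      have hpm := pvPopMergeB_toList 0 n.toNat heap 0 []
      have h1 : (pvPopMergeB 0 n.toNat heap 0 []).1
          = (pvPopMergeBM 0 n.toNat heap.toList 0 []).1 := by rw [← hpm]
      have h2 : (pvPopMergeB 0 n.toNat heap 0 []).2.toList
          = (pvPopMergeBM 0 n.toNat heap.toList 0 []).2 := by rw [← hpm]
      rw [h1, h2]
    · rfl

theorem pvFoldPush_toList {α γ : Type} (lt : α → α → Bool) (l : List γ) (f : γ → α)
    (a : Array α) :
    (l.foldl (fun h x => pvHeappush lt h (f x)) a).toList
      = l.foldl (fun h x => pvHeappushM lt h (f x)) a.toList := by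
  induction l generalizing a with
  | nil => rfl
  | cons x xs ih =>
    simp only [List.foldl_cons]
    rw [ih, pvHeappush_toList]



-- ── heapq commutes with mapping, when the map preserves the comparison ──
theorem pvSiftdownLoop_map {α β : Type} (g : α → β) (lt : α → α → Bool) (lt' : β → β → Bool)
    (hlt : ∀ a b, lt' (g a) (g b) = lt a b) (newitem : α) (heap : List α) (s p : Nat) :
    pvSiftdownLoopM lt' (g newitem) (heap.map g) s p = (pvSiftdownLoopM lt newitem heap s p).map g := by
  fun_induction pvSiftdownLoopM lt newitem heap s p with
  | case1 heap p hp pp par hcond ih =>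
    simp only [pp, par] at hcond ih
    rw [pvSiftdownLoopM]
    simp only [dif_pos hp, List.getD_map, hlt, hcond, if_true]
    rw [List.map_set] at ih
    exact ih
  | case2 heap p hp pp par hcond =>
    simp only [pp, par, List.getD_eq_getElem?_getD] at hcond
    rw [pvSiftdownLoopM]
    simp [dif_pos hp, hlt, List.getD_eq_getElem?_getD, hcond]
  | case3 heap p hp =>
    rw [pvSiftdownLoopM]
    simp only [dif_neg hp, List.map_set]

theorem pvHeappush_map {α β : Type} (g : α → β) (lt : α → α → Bool) (lt' : β → β → Bool)
    (hlt : ∀ a b, lt' (g a) (g b) = lt a b) (heap : List α) (item : α) :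
    pvHeappushM lt' (heap.map g) (g item) = (pvHeappushM lt heap item).map g := by
  unfold pvHeappushM
  have : heap.map g ++ [g item] = (heap ++ [item]).map g := by simp
  rw [this, List.length_map, pvSiftdownLoop_map g lt lt' hlt]

theorem pvSiftupLoop_map {α β : Type} (g : α → β) (lt : α → α → Bool) (lt' : β → β → Bool)
    (hlt : ∀ a b, lt' (g a) (g b) = lt a b) (junk : α) (heap : List α) (p e : Nat) :
    pvSiftupLoopM lt' (g junk) (heap.map g) p e
      = ((pvSiftupLoopM lt junk heap p e).1.map g, (pvSiftupLoopM lt junk heap p e).2) := by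
  fun_induction pvSiftupLoopM lt junk heap p e with
  | case1 heap p hp c ih =>
    simp only [c] at ih
    rw [pvSiftupLoopM]
    simp only [dif_pos hp, List.getD_map, hlt]
    rw [List.map_set] at ih
    exact ih
  | case2 heap p hp =>
    rw [pvSiftupLoopM]
    simp only [dif_neg hp]

theorem pvSiftup0_map {α β : Type} (g : α → β) (lt : α → α → Bool) (lt' : β → β → Bool)
    (hlt : ∀ a b, lt' (g a) (g b) = lt a b) (heap : List α) :
    pvSiftup0M lt' (heap.map g) = (pvSiftup0M lt heap).map g := by
  cases heap with
  | nil => rfl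
  | cons x xs =>
    simp only [pvSiftup0M, List.map_cons]
    have h1 : g x :: List.map g xs = (x :: xs).map g := rfl
    rw [h1, pvSiftupLoop_map g lt lt' hlt, List.length_map, ← List.map_set,
      pvSiftdownLoop_map g lt lt' hlt]

theorem pvHeappop_map {α β : Type} (g : α → β) (lt : α → α → Bool) (lt' : β → β → Bool)
    (hlt : ∀ a b, lt' (g a) (g b) = lt a b) (heap : List α) :
    pvHeappopM lt' (heap.map g)
      = (pvHeappopM lt heap).map (fun r => (g r.1, r.2.map g)) := by
  cases heap with
  | nil => rfl
  | cons x xs =>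
    simp only [pvHeappopM, List.map_cons]
    have h1 : g x :: List.map g xs = (x :: xs).map g := rfl
    have hlast : ((g x :: List.map g xs).getLast?).getD (g x)
        = g (((x :: xs).getLast?).getD x) := by
      rw [h1, List.getLast?_map]
      cases (x :: xs).getLast? <;> rfl
    cases hdl : (x :: xs).dropLast with
    | nil =>
      have h2 : (g x :: List.map g xs).dropLast = [] := by
        rw [h1, ← List.map_dropLast, hdl]; rfl
      rw [h2]
      simp [hlast]
    | cons y ys =>
      have h2 : (g x :: List.map g xs).dropLast = g y :: ys.map g := by
        rw [h1, ← List.map_dropLast, hdl]; rfl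
      rw [h2]
      simp only [hlast, Option.map_some]
      have hset : (g y :: List.map g ys).set 0 (g (((x :: xs).getLast?).getD x))
          = ((y :: ys).set 0 (((x :: xs).getLast?).getD x)).map g := by
        simp
      rw [hset, pvSiftup0_map g lt lt' hlt]

-- ── the abstraction: a Node maps to the (freq, codes) group B keeps in its heap ──

mutual
def pvEntries : PNode → List (String × List String)
  | .mk _ sym _ .nil => match sym with | some s => [(s, [])] | none => []
  | .mk _ _ _ (.cons c rest) => pvEntriesList (.cons c rest)
def pvEntriesList : PNodeList → List (String × List String)
  | .nil => []
  | .cons c rest =>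
    (pvEntries c).map (fun sc => (sc.1, c.huff :: sc.2)) ++ pvEntriesList rest
end

def pvAbs (nd : PNode) : Int × List (String × List String) := (nd.freq, pvEntries nd)

def pvEntriesOf (l : List PNode) : List (String × List String) :=
  (l.map (fun c => (pvEntries c).map (fun sc => (sc.1, c.huff :: sc.2)))).flatten

theorem pvLt_abs : ∀ a b, pvLtGroup (pvAbs a) (pvAbs b) = pvLtNode a b := fun _ _ => rfl

theorem pvEntries_setHuff (nd : PNode) (h : String) :
    pvEntries (nd.setHuff h) = pvEntries nd := by
  cases nd with | mk f s hh c => cases c <;> rfl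

theorem pvEntriesList_ofList (l : List PNode) :
    pvEntriesList (PNodeList.ofList l) = pvEntriesOf l := by
  induction l with
  | nil => rfl
  | cons x xs ih => simp [PNodeList.ofList, pvEntriesList, pvEntriesOf] at *; rw [ih]

theorem pvEntries_newNode (f : Int) (h : String) (l : List PNode) :
    pvEntries (PNode.mk f none h (PNodeList.ofList l)) = pvEntriesOf l := by
  cases l with
  | nil => rfl
  | cons x xs => rw [show PNodeList.ofList (x :: xs) = .cons x (PNodeList.ofList xs) from rfl,
      pvEntries, ← pvEntriesList_ofList]; rfl

theorem pvPopCandidatesA_acc (cnt i : Nat) (heap : List PNode) (acc : List PNode) :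
    pvPopCandidatesAM i cnt heap acc
      = (acc ++ (pvPopCandidatesAM i cnt heap []).1, (pvPopCandidatesAM i cnt heap []).2) := by
  induction cnt generalizing i heap acc with
  | zero => simp [pvPopCandidatesAM]
  | succ cnt ih =>
    rw [pvPopCandidatesAM]
    conv_rhs => rw [pvPopCandidatesAM]
    cases h : pvHeappopM pvLtNode heap with
    | none => simp
    | some r =>
      simp only [List.nil_append]
      rw [ih _ _ (acc ++ _), ih _ _ ([_])]
      simp

theorem pvPopMergeB_eq (cnt i : Nat) (heap : List PNode) (t : Int)
    (m : List (String × List String)) :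
    pvPopMergeBM i cnt (heap.map pvAbs) t m
      = ((t + ((pvPopCandidatesAM i cnt heap []).1.map PNode.freq).sum,
          m ++ pvEntriesOf (pvPopCandidatesAM i cnt heap []).1),
         (pvPopCandidatesAM i cnt heap []).2.map pvAbs) := by
  induction cnt generalizing i heap t m with
  | zero => simp [pvPopMergeBM, pvPopCandidatesAM, pvEntriesOf]
  | succ cnt ih =>
    rw [pvPopMergeBM, pvPopCandidatesAM, pvHeappop_map pvAbs pvLtNode pvLtGroup pvLt_abs]
    cases h : pvHeappopM pvLtNode heap with
    | none => simp [pvEntriesOf]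
    | some r =>
      obtain ⟨nd, heap'⟩ := r
      simp only [Option.map_some]
      rw [ih]
      simp only [List.nil_append]
      rw [pvPopCandidatesA_acc cnt (i + 1) heap' [_]]
      simp [pvEntriesOf, pvAbs, PNode.setHuff, PNode.huff]
      constructor
      · cases nd; simp [PNode.freq]; ring
      · cases nd with | mk f sy hh c => cases c <;> rfl

theorem pvMergeLoopB_map (fuel : Nat) (n : Int) (heap : List PNode) :
    pvMergeLoopBM fuel n (heap.map pvAbs) = (pvMergeLoopAM fuel n heap).map pvAbs := by
  induction fuel generalizing heap with
  | zero => rfl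
  | succ fuel ih =>
    simp only [pvMergeLoopBM, pvMergeLoopAM, List.length_map]
    split
    · rw [pvPopMergeB_eq]
      have habs : (0 + ((pvPopCandidatesAM 0 n.toNat heap []).1.map PNode.freq).sum,
            [] ++ pvEntriesOf (pvPopCandidatesAM 0 n.toNat heap []).1)
          = pvAbs (PNode.mk ((pvPopCandidatesAM 0 n.toNat heap []).1.foldl
              (fun s nd => s + nd.freq) 0) none ""
              (PNodeList.ofList (pvPopCandidatesAM 0 n.toNat heap []).1)) := by
        rw [pvAbs, PNode.freq, pvEntries_newNode, PySem.List.foldl_add]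
        simp
      rw [habs, pvHeappush_map pvAbs pvLtNode pvLtGroup pvLt_abs, ih]
    · rfl

theorem pvFoldPush_map {γ : Type} (l : List γ) (mkA : γ → PNode)
    (mkB : γ → Int × List (String × List String)) (h : ∀ x, mkB x = pvAbs (mkA x))
    (heap : List PNode) :
    l.foldl (fun hp x => pvHeappushM pvLtGroup hp (mkB x)) (heap.map pvAbs)
      = (l.foldl (fun hp x => pvHeappushM pvLtNode hp (mkA x)) heap).map pvAbs := by
  induction l generalizing heap with
  | nil => rfl
  | cons x xs ih =>
    simp only [List.foldl_cons]
    rw [h, pvHeappush_map pvAbs pvLtNode pvLtGroup pvLt_abs, ih]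

-- ── characterising A's recursive print traversal as folds over the entry list ──
def pvStep (acc h : String) : String := if acc ≠ "" then acc ++ "," ++ h else h

def pvValOf (v : String) (p : List String) : String := p.foldl pvStep v

def pvDins (d : PySem.Dict String String) (v : String)
    (E : List (String × List String)) : PySem.Dict String String :=
  E.foldl (fun d sc => d.insert sc.1 (pvValOf v sc.2)) d

def pvMfold (m : Int) (v : String) (E : List (String × List String)) : Int :=
  E.foldl (fun m sc => max m ((PySem.Str.count (pvValOf v sc.2) "," : Int) + 1)) m

theorem pvMfold_shift (E : List (String × List String)) (v : String) (m : Int)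
    (hm : 0 ≤ m) : pvMfold m v E = max m (pvMfold 0 v E) := by
  induction E generalizing m with
  | nil => simp only [pvMfold, List.foldl_nil]; omega
  | cons sc E ih =>
    have hc : (0 : Int) ≤ (PySem.Str.count (pvValOf v sc.2) "," : Int) + 1 := by positivity
    simp only [pvMfold, List.foldl_cons] at *
    rw [ih (max m _) (by omega), ih (max 0 _) (by omega)]
    omega

theorem pvDins_map_prep (d : PySem.Dict String String) (v h : String)
    (E : List (String × List String)) :
    pvDins d v (E.map (fun sc => (sc.1, h :: sc.2))) = pvDins d (pvStep v h) E := by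
  simp [pvDins, List.foldl_map, pvValOf]

theorem pvMfold_map_prep (m : Int) (v h : String) (E : List (String × List String)) :
    pvMfold m v (E.map (fun sc => (sc.1, h :: sc.2))) = pvMfold m (pvStep v h) E := by
  simp [pvMfold, List.foldl_map, pvValOf]

mutual
theorem pvPrintNodes_spec (nd : PNode) (val : String) (d : PySem.Dict String String) :
    pvPrintNodes nd val d
      = (pvDins d val ((pvEntries nd).map (fun sc => (sc.1, nd.huff :: sc.2))),
         pvMfold 0 val ((pvEntries nd).map (fun sc => (sc.1, nd.huff :: sc.2)))) := by
  cases nd with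
  | mk f sym huff children =>
    cases children with
    | nil =>
      cases sym with
      | none => rfl
      | some s =>
        have hs : (if val ≠ "" then val ++ "," ++ huff else huff) = pvStep val huff := rfl
        simp only [pvPrintNodes, pvPrintChildren, pvEntries, PNode.huff, hs,
          List.map_cons, List.map_nil, pvDins, pvMfold, pvValOf, List.foldl_cons,
          List.foldl_nil, Prod.mk.injEq]
        have hc : (0 : Int) ≤ (PySem.Str.count (pvStep val huff) "," : Int) + 1 := by positivity
        exact ⟨trivial, by omega⟩
    | cons c rest =>
      have hs : (if val ≠ "" then val ++ "," ++ huff else huff) = pvStep val huff := rfl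
      simp only [pvPrintNodes, hs]
      rw [pvPrintChildren_spec (.cons c rest) (pvStep val huff) d 0 le_rfl]
      simp only [PNode.huff, pvEntries, pvDins_map_prep, pvMfold_map_prep]

theorem pvPrintChildren_spec (cs : PNodeList) (v : String) (d : PySem.Dict String String)
    (m : Int) (hm : 0 ≤ m) :
    pvPrintChildren cs v d m = (pvDins d v (pvEntriesList cs), pvMfold m v (pvEntriesList cs)) := by
  cases cs with
  | nil => rfl
  | cons c rest =>
    rw [pvPrintChildren, pvPrintNodes_spec c v d]
    have hnn : (0 : Int) ≤ pvMfold 0 v ((pvEntries c).map (fun sc => (sc.1, c.huff :: sc.2))) := by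
      rw [pvMfold_shift _ _ _ le_rfl]; omega
    have hmax : (if pvMfold 0 v ((pvEntries c).map (fun sc => (sc.1, c.huff :: sc.2))) > m
        then pvMfold 0 v ((pvEntries c).map (fun sc => (sc.1, c.huff :: sc.2))) else m)
        = max m (pvMfold 0 v ((pvEntries c).map (fun sc => (sc.1, c.huff :: sc.2)))) := by
      omega
    show pvPrintChildren rest v _ _ = _
    rw [hmax, pvPrintChildren_spec rest v _ _ (le_trans hm (le_max_left _ _)),
      ← pvMfold_shift _ _ _ hm]
    simp only [pvEntriesList, pvDins, pvMfold, List.foldl_append]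
end

-- ── heap membership: heap operations never invent elements ──
theorem pvGetD_mem_or {α : Type} (l : List α) (n : Nat) (d : α) :
    l.getD n d ∈ l ∨ l.getD n d = d := by
  rw [List.getD_eq_getElem?_getD]
  cases h : l[n]? with
  | none => right; rfl
  | some v => left; simpa using List.mem_of_getElem? h

theorem mem_pvSiftdownLoop {α : Type} (lt : α → α → Bool) (it : α) (heap : List α)
    (s p : Nat) : ∀ x ∈ pvSiftdownLoopM lt it heap s p, x = it ∨ x ∈ heap := by
  fun_induction pvSiftdownLoopM lt it heap s p with
  | case1 heap p hp pp par hcond ih =>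
    intro x hx
    rcases ih x hx with h | h
    · exact Or.inl h
    · rcases List.mem_or_eq_of_mem_set h with h2 | h2
      · exact Or.inr h2
      · subst h2
        rcases pvGetD_mem_or heap ((p - 1) / 2) it with h3 | h3
        · exact Or.inr h3
        · exact Or.inl h3
  | case2 heap p hp pp par hcond =>
    intro x hx
    rcases List.mem_or_eq_of_mem_set hx with h | h
    · exact Or.inr h
    · exact Or.inl h
  | case3 heap p hp =>
    intro x hx
    rcases List.mem_or_eq_of_mem_set hx with h | h
    · exact Or.inr h
    · exact Or.inl h

theorem mem_pvHeappush {α : Type} (lt : α → α → Bool) (heap : List α) (item : α) :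
    ∀ x ∈ pvHeappushM lt heap item, x = item ∨ x ∈ heap := by
  intro x hx
  rcases mem_pvSiftdownLoop lt item (heap ++ [item]) 0 heap.length x hx with h | h
  · exact Or.inl h
  · rcases List.mem_append.mp h with h2 | h2
    · exact Or.inr h2
    · exact Or.inl (by simpa using h2)

theorem mem_pvSiftupLoop {α : Type} (lt : α → α → Bool) (junk : α) (heap : List α)
    (p e : Nat) : ∀ x ∈ (pvSiftupLoopM lt junk heap p e).1, x ∈ heap ∨ x = junk := by
  fun_induction pvSiftupLoopM lt junk heap p e with
  | case1 heap p hp c ih =>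
    intro x hx
    rcases ih x hx with h | h
    · rcases List.mem_or_eq_of_mem_set h with h2 | h2
      · exact Or.inl h2
      · subst h2
        rcases pvGetD_mem_or heap c junk with h3 | h3
        · exact Or.inl h3
        · exact Or.inr h3
    · exact Or.inr h
  | case2 heap p hp => intro x hx; exact Or.inl hx

theorem mem_pvSiftup0 {α : Type} (lt : α → α → Bool) (heap : List α) :
    ∀ x ∈ pvSiftup0M lt heap, x ∈ heap := by
  cases heap with
  | nil => intro x hx; cases hx
  | cons y ys =>
    intro x hx
    simp only [pvSiftup0M] at hx
    rcases mem_pvSiftdownLoop _ _ _ _ _ x hx with h | h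
    · subst h; exact List.mem_cons_self
    · rcases List.mem_or_eq_of_mem_set h with h2 | h2
      · rcases mem_pvSiftupLoop lt y (y :: ys) 0 (y :: ys).length x h2 with h3 | h3
        · exact h3
        · subst h3; exact List.mem_cons_self
      · subst h2; exact List.mem_cons_self

theorem mem_pvHeappop {α : Type} (lt : α → α → Bool) (heap : List α) (r : α)
    (h' : List α) (h : pvHeappopM lt heap = some (r, h')) :
    r ∈ heap ∧ ∀ x ∈ h', x ∈ heap := by
  cases heap with
  | nil => cases h
  | cons y ys =>
    have hlast : ((y :: ys).getLast?).getD y ∈ y :: ys := by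
      cases hg : (y :: ys).getLast? with
      | none => simp at hg
      | some v => simpa using List.mem_of_getLast? hg
    simp only [pvHeappopM] at h
    cases hdl : (y :: ys).dropLast with
    | nil =>
      rw [hdl] at h
      injection h with h; injection h with h1 h2
      subst h1; subst h2
      exact ⟨hlast, by intro x hx; cases hx⟩
    | cons z zs =>
      rw [hdl] at h
      injection h with h; injection h with h1 h2
      subst h1; subst h2
      have hsub : ∀ x ∈ z :: zs, x ∈ y :: ys := by
        intro x hx
        have := (List.dropLast_sublist (y :: ys)).mem (by rw [hdl]; exact hx)
        exact this
      constructor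
      · exact hsub z List.mem_cons_self
      · intro x hx
        have h2 := mem_pvSiftup0 lt _ x hx
        rcases List.mem_or_eq_of_mem_set h2 with h3 | h3
        · exact hsub x h3
        · subst h3; exact hlast

-- ── the invariant: heap nodes carry huff = "" and digit-string code components ──
def pvGoodStr (c : String) : Prop := c ≠ "" ∧ ',' ∉ c.toList

def pvGoodE (E : List (String × List String)) : Prop :=
  ∀ sc ∈ E, ∀ c ∈ sc.2, pvGoodStr c

def pvInv (heap : List PNode) : Prop :=
  ∀ x ∈ heap, x.huff = "" ∧ pvGoodE (pvEntries x)

set_option maxHeartbeats 1000000 in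
theorem pvToStr_good (n : Nat) : pvGoodStr (PySem.Int.toStr (n : Int)) := by
  have hch : (PySem.Int.toStr (n : Int)).toList = Nat.toDigits 10 n := by
    have hnneg : ¬ ((n : Int) < 0) := by omega
    rw [PySem.Int.toList_toStr, PySem.Int.toChars, if_neg hnneg, Int.toNat_natCast]
  have hne : ∀ (f m : Nat) (ds : List Char), ds ≠ [] ∨ f ≠ 0 →
      Nat.toDigitsCore 10 f m ds ≠ [] := by
    intro f
    induction f with
    | zero => intro m ds h; simp only [Nat.toDigitsCore]; tauto
    | succ f ih =>
      intro m ds _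
      simp only [Nat.toDigitsCore]
      split
      · simp
      · exact ih _ _ (Or.inl (by simp))
  have hmem : ∀ (f m : Nat) (ds : List Char), ∀ c ∈ Nat.toDigitsCore 10 f m ds,
      c ∈ ds ∨ ∃ k, c = Nat.digitChar k := by
    intro f
    induction f with
    | zero => intro m ds c hc; exact Or.inl hc
    | succ f ih =>
      intro m ds c hc
      simp only [Nat.toDigitsCore] at hc
      split at hc
      · rcases List.mem_cons.mp hc with h | h
        · exact Or.inr ⟨_, h⟩
        · exact Or.inl h
      · rcases ih _ _ c hc with h | h
        · rcases List.mem_cons.mp h with h2 | h2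
          · exact Or.inr ⟨_, h2⟩
          · exact Or.inl h2
        · exact Or.inr h
  have hdc : ∀ k, Nat.digitChar k ≠ ',' := by
    intro k h
    by_cases hk : k < 16
    · interval_cases k <;> exact absurd h (by decide)
    · have he : Nat.digitChar k = '*' := by
        rw [Nat.digitChar]
        repeat rw [if_neg (by omega)]
      rw [he] at h
      exact absurd h (by decide)
  constructor
  · intro h
    have : (PySem.Int.toStr (n : Int)).toList = [] := by rw [h]; rfl
    rw [hch] at this
    rw [Nat.toDigits] at this
    exact hne (n + 1) n [] (Or.inr (by omega)) this
  · intro h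
    rw [hch, Nat.toDigits] at h
    rcases hmem _ _ _ _ h with h2 | h2
    · cases h2
    · rcases h2 with ⟨k, hk⟩; exact hdc k hk.symm

theorem pvInv_push (heap : List PNode) (nd : PNode) (hh : pvInv heap)
    (hnd : nd.huff = "" ∧ pvGoodE (pvEntries nd)) : pvInv (pvHeappushM pvLtNode heap nd) := by
  intro x hx
  rcases mem_pvHeappush _ _ _ x hx with h | h
  · subst h; exact hnd
  · exact hh x h

theorem pvInv_popCandidates (cnt i : Nat) (heap acc : List PNode) (hh : pvInv heap)
    (hacc : ∀ x ∈ acc, pvGoodE (pvEntries x) ∧ pvGoodStr x.huff ) :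
    (∀ x ∈ (pvPopCandidatesAM i cnt heap acc).1,
        pvGoodE (pvEntries x) ∧ pvGoodStr x.huff) ∧
      pvInv (pvPopCandidatesAM i cnt heap acc).2 := by
  induction cnt generalizing i heap acc with
  | zero => exact ⟨hacc, hh⟩
  | succ cnt ih =>
    rw [pvPopCandidatesAM]
    cases hp : pvHeappopM pvLtNode heap with
    | none => exact ⟨hacc, hh⟩
    | some r =>
      obtain ⟨nd, heap'⟩ := r
      have hmem := mem_pvHeappop pvLtNode heap nd heap' hp
      have hnd := hh nd hmem.1
      refine ih (i + 1) heap' _ (fun x hx => hh x (hmem.2 x hx)) ?_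
      intro x hx
      rcases List.mem_append.mp hx with h | h
      · exact hacc x h
      · have hx2 : x = nd.setHuff (PySem.Int.toStr (i : Int)) := by simpa using h
        subst hx2
        refine ⟨by rw [pvEntries_setHuff]; exact hnd.2, ?_⟩
        have : (nd.setHuff (PySem.Int.toStr (i : Int))).huff = PySem.Int.toStr (i : Int) := by
          cases nd; rfl
        rw [this]
        exact pvToStr_good i

theorem pvGoodE_entriesOf (l : List PNode)
    (hl : ∀ x ∈ l, pvGoodE (pvEntries x) ∧ pvGoodStr x.huff) :
    pvGoodE (pvEntriesOf l) := by
  intro sc hsc c hc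
  simp only [pvEntriesOf, List.mem_flatten, List.mem_map] at hsc
  obtain ⟨_, ⟨nd, hnd, rfl⟩, hsc⟩ := hsc
  simp only [List.mem_map] at hsc
  obtain ⟨sc0, hsc0, rfl⟩ := hsc
  rcases List.mem_cons.mp hc with h | h
  · subst h; exact (hl nd hnd).2
  · exact (hl nd hnd).1 sc0 hsc0 c h

theorem pvInv_mergeLoop (fuel : Nat) (n : Int) (heap : List PNode) (hh : pvInv heap) :
    pvInv (pvMergeLoopAM fuel n heap) := by
  induction fuel generalizing heap with
  | zero => exact hh
  | succ fuel ih =>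
    rw [pvMergeLoopAM]
    split
    · have hpc := pvInv_popCandidates n.toNat 0 heap [] hh (by intro x hx; cases hx)
      refine ih _ (pvInv_push _ _ hpc.2 ?_)
      refine ⟨rfl, ?_⟩
      rw [pvEntries_newNode]
      exact pvGoodE_entriesOf _ hpc.1
    · exact hh

theorem pvInv_foldPush {γ : Type} (l : List γ) (mkA : γ → PNode) (heap : List PNode)
    (hh : pvInv heap) (hmk : ∀ x, (mkA x).huff = "" ∧ pvGoodE (pvEntries (mkA x))) :
    pvInv (l.foldl (fun hp x => pvHeappushM pvLtNode hp (mkA x)) heap) := by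
  induction l generalizing heap with
  | nil => exact hh
  | cons x xs ih => exact ih _ (pvInv_push _ _ hh (hmk x))

-- ── code strings: fold of A's comma-step equals B's ','.join; comma count = parts ──
theorem pvIntercalate_comma (x : List Char) (xs : List (List Char)) :
    List.intercalate [','] (x :: xs) = x ++ (xs.map (fun l => ',' :: l)).flatten := by
  induction xs generalizing x with
  | nil => simp [List.intercalate]
  | cons y ys ih =>
    have h2 : List.intercalate [','] (x :: y :: ys) = x ++ [','] ++ List.intercalate [','] (y :: ys) := by
      simp [List.intercalate, List.intersperse]
    rw [h2, ih y]
    simp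

theorem pvValOf_toList (p : List String) : ∀ v : String, v ≠ "" →
    (pvValOf v p).toList = v.toList ++ (p.map (fun c => ',' :: c.toList)).flatten := by
  induction p with
  | nil => intro v _; simp [pvValOf]
  | cons a rest ih =>
    intro v hv
    have hstep : pvStep v a = v ++ "," ++ a := by simp [pvStep, hv]
    have hne : pvStep v a ≠ "" := by
      intro h
      have := congrArg String.toList h
      rw [hstep] at this
      simp [String.toList_append] at this
    show (pvValOf (pvStep v a) rest).toList = _
    rw [ih (pvStep v a) hne, hstep]
    simp [String.toList_append]

theorem pvJoin_toList (p : List String) :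
    (PySem.Str.join "," p).toList = List.intercalate [','] (p.map String.toList) := by
  simp [PySem.Str.join, PySem.Chars.join]

theorem pvValOf_join (p : List String) (hp : ∀ c ∈ p, c ≠ "") :
    pvValOf "" p = PySem.Str.join "," p := by
  apply String.toList_inj.mp
  cases p with
  | nil => rfl
  | cons a rest =>
    have hstep : pvValOf "" (a :: rest) = pvValOf a rest := rfl
    rw [hstep, pvValOf_toList rest a (hp a List.mem_cons_self), pvJoin_toList,
      List.map_cons, pvIntercalate_comma]
    simp [List.map_map]
    rfl

theorem pvCountGo_single (c : Char) : ∀ (fuel : Nat) (l : List Char) (acc : Nat),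
    l.length ≤ fuel → PySem.Chars.count.go [c] fuel l acc = acc + l.count c := by
  intro fuel
  induction fuel with
  | zero =>
    intro l acc hl
    have : l = [] := List.eq_nil_of_length_eq_zero (by omega)
    subst this; rfl
  | succ f ih =>
    intro l acc hl
    cases l with
    | nil => rfl
    | cons h t =>
      have hpre : List.isPrefixOf [c] (h :: t) = (c == h) := by
        simp [List.isPrefixOf]
      rw [PySem.Chars.count.go, hpre]
      by_cases hch : c = h
      · subst hch
        simp only [beq_self_eq_true, if_true]
        have hdrop : List.drop ([c].length) (c :: t) = t := by simp
        rw [hdrop, ih t (acc + 1) (by simpa using hl)]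
        simp
        omega
      · have : (c == h) = false := by simpa using hch
        rw [this]
        simp only [Bool.false_eq_true, if_false]
        rw [ih t acc (by simpa using hl)]
        simp [List.count_cons]
        intro h2
        exact absurd h2.symm hch

theorem pvStrCount_comma (s : String) :
    PySem.Str.count s "," = s.toList.count ',' := by
  have h1 : ("," : String).toList = [','] := rfl
  rw [PySem.Str.count, h1, PySem.Chars.count]
  simp only [List.isEmpty_cons, if_false, Bool.false_eq_true]
  simpa using pvCountGo_single ',' s.toList.length s.toList 0 le_rfl

theorem pvCount_join (p : List String) (hp : ∀ c ∈ p, ',' ∉ c.toList) :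
    (PySem.Str.count (PySem.Str.join "," p) "," : Int) + 1 = max (p.length : Int) 1 := by
  cases p with
  | nil =>
    have : (PySem.Str.join "," ([] : List String)).toList = [] := by rw [pvJoin_toList]; rfl
    rw [pvStrCount_comma, this]
    simp
  | cons a rest =>
    rw [pvStrCount_comma, pvJoin_toList, List.map_cons, pvIntercalate_comma]
    have hc0 : ∀ c ∈ a :: rest, c.toList.count ',' = 0 := by
      intro c hc
      exact List.count_eq_zero.mpr (hp c hc)
    rw [List.count_append, hc0 a List.mem_cons_self]
    have hf : ((rest.map String.toList).map (fun l => ',' :: l)).flatten.count ','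
        = rest.length := by
      rw [List.count_flatten]
      have : ∀ c ∈ rest, (',' :: c.toList).count ',' = 1 := by
        intro c hc
        rw [List.count_cons, List.count_eq_zero.mpr (hp c (List.mem_cons_of_mem a hc))]
        simp
      rw [List.map_map, List.map_map]
      calc (rest.map fun c => (',' :: c.toList).count ',').sum
          = (rest.map fun _ => 1).sum := by
            apply congrArg
            exact List.map_congr_left (fun c hc => this c hc)
        _ = rest.length := by simp
    rw [hf]
    push_cast [List.length_cons]
    omega


theorem pv_main (fd : List (String × Int)) (n : Int) :
    n_ary_huffman_coding fd n = n_ary_huffman_coding_alt fd n := by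
  simp only [n_ary_huffman_coding, n_ary_huffman_coding_alt]
  set items := (PySem.Dict.ofList fd).items with hitems
  set remain := PySem.Int.mod ((items.length : Int) - 1) (n - 1) with hremain
  set nodes1 := (if remain ≠ 0 then
      (List.range (n - 1 - remain).toNat).foldl
        (fun h _ => pvHeappush pvLtNode h (.mk 0 none "" .nil)) (#[] : Array PNode)
    else (#[] : Array PNode)) with hn1
  set groups1 := (if remain ≠ 0 then
      (List.range (n - 1 - remain).toNat).foldl
        (fun h _ => pvHeappush pvLtGroup h (0, []))
        (#[] : Array (Int × List (String × List String)))
    else (#[] : Array (Int × List (String × List String)))) with hg1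
  have e1 : groups1.toList = nodes1.toList.map pvAbs := by
    rw [hn1, hg1]
    by_cases h : remain ≠ 0
    · simp only [if_pos h]
      rw [pvFoldPush_toList, pvFoldPush_toList]
      exact pvFoldPush_map (List.range (n - 1 - remain).toNat)
        (fun _ => PNode.mk 0 none "" .nil)
        (fun _ => ((0 : Int), ([] : List (String × List String))))
        (fun _ => rfl) []
    · simp only [if_neg h]; rfl
  have inv1 : pvInv nodes1.toList := by
    rw [hn1]
    by_cases h : remain ≠ 0
    · simp only [if_pos h]
      rw [pvFoldPush_toList]
      exact pvInv_foldPush _ _ _ (by intro x hx; cases hx)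
        (fun _ => ⟨rfl, by intro sc hsc; cases hsc⟩)
    · simp only [if_neg h]; intro x hx; cases hx
  set nodes2 := items.foldl
    (fun h kv => pvHeappush pvLtNode h (.mk kv.2 (some kv.1) "" .nil)) nodes1 with hn2
  set groups2 := items.foldl
    (fun h kv => pvHeappush pvLtGroup h (kv.2, [(kv.1, [])])) groups1 with hg2
  have e2 : groups2.toList = nodes2.toList.map pvAbs := by
    rw [hn2, hg2, pvFoldPush_toList, pvFoldPush_toList, e1]
    exact pvFoldPush_map items
      (fun kv => PNode.mk kv.2 (some kv.1) "" PNodeList.nil)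
      (fun kv => ((kv.2 : Int), [(kv.1, ([] : List String))]))
      (fun _ => rfl) nodes1.toList
  have inv2 : pvInv nodes2.toList := by
    rw [hn2, pvFoldPush_toList]
    refine pvInv_foldPush _ _ _ inv1 (fun kv => ⟨rfl, ?_⟩)
    intro sc hsc c hc
    have : sc = (kv.1, []) := by simpa [pvEntries] using hsc
    subst this; cases hc
  have hsz : groups2.size = nodes2.size := by
    rw [← Array.length_toList, ← Array.length_toList, e2, List.length_map]
  have e3 : (pvMergeLoopB groups2.size n groups2).toList
      = ((pvMergeLoopAM nodes2.size n nodes2.toList).map pvAbs) := by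
    rw [pvMergeLoopB_toList, e2, hsz, pvMergeLoopB_map]
  have inv3 : pvInv (pvMergeLoopAM nodes2.size n nodes2.toList) :=
    pvInv_mergeLoop _ _ _ inv2
  have hA0 : (pvMergeLoopA nodes2.size n nodes2)[0]?
      = (pvMergeLoopAM nodes2.size n nodes2.toList)[0]? := by
    rw [← Array.getElem?_toList, pvMergeLoopA_toList]
  have hB0 : (pvMergeLoopB groups2.size n groups2)[0]?
      = ((pvMergeLoopAM nodes2.size n nodes2.toList).map pvAbs)[0]? := by
    rw [← Array.getElem?_toList, e3]
  rw [hA0, hB0]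
  cases hA : pvMergeLoopAM nodes2.size n nodes2.toList with
  | nil => rfl
  | cons root rest =>
    rw [hA] at inv3
    obtain ⟨hhuff, hgood⟩ := inv3 root List.mem_cons_self
    simp only [List.map_cons, List.getElem?_cons_zero]
    show ((pvPrintNodes root "" PySem.Dict.empty).1.items,
        (pvPrintNodes root "" PySem.Dict.empty).2) = _
    rw [pvPrintNodes_spec root "" PySem.Dict.empty, hhuff]
    have hstep0 : pvStep "" "" = "" := by simp [pvStep]
    rw [pvDins_map_prep, pvMfold_map_prep, hstep0]
    show _ = (((pvEntries root).foldl
        (fun acc sc => (acc.1.insert sc.1 (PySem.Str.join "," sc.2),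
          max acc.2 (max (sc.2.length : Int) 1))) (PySem.Dict.empty, 0)).1.items,
      ((pvEntries root).foldl
        (fun acc sc => (acc.1.insert sc.1 (PySem.Str.join "," sc.2),
          max acc.2 (max (sc.2.length : Int) 1))) (PySem.Dict.empty, 0)).2)
    rw [PySem.List.foldl_prod_mk
      (fun d (sc : String × List String) => d.insert sc.1 (PySem.Str.join "," sc.2))
      (fun m (sc : String × List String) => max m (max (sc.2.length : Int) 1))
      (pvEntries root) PySem.Dict.empty 0]
    have hd : pvDins PySem.Dict.empty "" (pvEntries root)
        = (pvEntries root).foldl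
            (fun d sc => d.insert sc.1 (PySem.Str.join "," sc.2)) PySem.Dict.empty := by
      apply PySem.List.foldl_congr_mem
      intro acc sc hsc
      rw [pvValOf_join sc.2 (fun c hc => (hgood sc hsc c hc).1)]
    have hm : pvMfold 0 "" (pvEntries root)
        = (pvEntries root).foldl
            (fun m sc => max m (max (sc.2.length : Int) 1)) 0 := by
      apply PySem.List.foldl_congr_mem
      intro acc sc hsc
      rw [pvValOf_join sc.2 (fun c hc => (hgood sc hsc c hc).1),
        pvCount_join sc.2 (fun c hc => (hgood sc hsc c hc).2)]
    rw [hd, hm]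

-- ===== VERDICT (by name: the statement is the Claim_ definition above) =====
theorem n_ary_huffman_coding_spec : Claim_equal_n_ary_huffman_coding := by
  intro fd n _ _
  unfold Spec_n_ary_huffman_coding
  exact pv_main fd n
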